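-- pv_equiv track=rewrite | github.com/pypi-data/pypi-mirror-386 | packages/noveler/noveler-3.0.0.tar.gz/noveler-3.0.0/src/mcp_servers/noveler/tools/fix_style_extended_tool.py | _add_closing_brackets
-- ===== SOURCE A (Python) =====
-- def _add_closing_brackets(content: str, left: str, right: str, count: int) -> str:
--     """閉じ括弧を追加"""
--     lines = content.split("\n")
--     added = 0
--
--     for i in range(len(lines) - 1, -1, -1):  # 後ろから処理
--         if added >= count:
--             break
--
--         line = lines[i].strip()
--         if line and left in line and not line.endswith(right):
--             # この行に開き括弧があり、閉じ括弧で終わっていない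
--             lines[i] = lines[i].rstrip() + right
--             added += 1
--
--     return "\n".join(lines)
-- ===== SOURCE B (Python) =====
-- def _add_closing_brackets(content: str, left: str, right: str, count: int) -> str:
--     """Forward index-collecting pass, then targeted modification of the last `count` eligible lines."""
--     lines = content.split("\n")
--     idxs = [i for i, ln in enumerate(lines)
--             if ln.strip() and left in ln.strip() and not ln.strip().endswith(right)]
--     selected = idxs[max(0, len(idxs) - count):] if count > 0 else []
--     for i in selected:
--         lines[i] = lines[i].rstrip() + right
--     return "\n".join(lines)
-- ===== Notes on version B (the rewrite author's own statement) =====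
-- stated objective: alternative
-- what changed: Replaces the backward early-exit scan that mutates while counting with a forward pass that collects all eligible line indices, slices off the last `count` of them, and then applies the modification only at those indices.
import Mathlib
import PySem

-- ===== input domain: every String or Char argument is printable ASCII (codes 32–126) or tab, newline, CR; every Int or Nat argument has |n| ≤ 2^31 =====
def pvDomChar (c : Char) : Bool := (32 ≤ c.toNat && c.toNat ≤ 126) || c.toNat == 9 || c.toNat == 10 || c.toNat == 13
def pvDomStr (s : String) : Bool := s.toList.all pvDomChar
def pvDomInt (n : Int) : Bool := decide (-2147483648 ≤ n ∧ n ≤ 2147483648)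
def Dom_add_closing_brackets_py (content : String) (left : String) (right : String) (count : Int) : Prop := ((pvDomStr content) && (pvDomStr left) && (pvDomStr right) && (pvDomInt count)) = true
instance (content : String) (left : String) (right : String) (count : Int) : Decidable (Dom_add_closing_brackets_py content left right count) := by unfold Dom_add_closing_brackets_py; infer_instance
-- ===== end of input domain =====

-- B replaces A's backward mutate-while-counting scan with a forward pass collecting eligible
-- indices, a slice selecting the last `count` of them, and a targeted modification pass
-- (objective: alternative decomposition, same cost).

-- ===== PORT A =====
-- A's backward loop: fuel i processes Python index i-1 down to 0; breaks when added ≥ count.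
-- lines[i] is read with getD (the loop index is always in range).
def addClosingA_loop (left right : String) (count : Int) : Nat → List String → Int → List String
  | 0, lines, _ => lines
  | i + 1, lines, added =>
    if count ≤ added then lines
    else
      let line := PySem.Str.strip (lines.getD i "")
      if line != "" && PySem.Str.isIn left line && !(PySem.Str.endswith line right) then
        addClosingA_loop left right count i
          (lines.set i (PySem.Str.rstrip (lines.getD i "") ++ right)) (added + 1)
      else
        addClosingA_loop left right count i lines added

def add_closing_brackets_py (content : String) (left : String) (right : String) (count : Int) : String :=
  let lines := (PySem.Str.split? content "\n").getD []   -- sep "\n" ≠ "": split? is always some here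
  PySem.Str.join "\n" (addClosingA_loop left right count lines.length lines 0)

-- ===== PORT B =====
def add_closing_brackets_py_alt (content : String) (left : String) (right : String) (count : Int) : String :=
  let lines := (PySem.Str.split? content "\n").getD []   -- sep "\n" ≠ "": split? is always some here
  let idxs : List Nat :=
    ((PySem.List.enumerate lines).filter (fun p =>
        let s := PySem.Str.strip p.2
        s != "" && PySem.Str.isIn left s && !(PySem.Str.endswith s right))).map
      (fun p => p.1.toNat)   -- enumerate indices are ≥ 0
  let selected := if count > 0 then idxs.drop (idxs.length - count.toNat) else []
  let lines2 := selected.foldl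
    (fun ls i => ls.set i (PySem.Str.rstrip (ls.getD i "") ++ right)) lines
  PySem.Str.join "\n" lines2

-- ===== PRECONDITION & SPEC =====
def Spec_add_closing_brackets_py (content : String) (left : String) (right : String) (count : Int) (out : String) : Prop := out = add_closing_brackets_py_alt content left right count
instance (content : String) (left : String) (right : String) (count : Int) (out : String) : Decidable (Spec_add_closing_brackets_py content left right count out) := by unfold Spec_add_closing_brackets_py; infer_instance

-- ===== CLAIM (what is proved, stated in full; the proofs are below) =====
def Claim_equal_add_closing_brackets_py : Prop := ∀ (content : String) (left : String) (right : String) (count : Int), Dom_add_closing_brackets_py content left right count → Spec_add_closing_brackets_py content left right count (add_closing_brackets_py content left right count)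

-- ===== LEMMAS AND PROOFS =====

-- the eligibility predicate both ports test
def pvElig (left right ln : String) : Bool :=
  let s := PySem.Str.strip ln
  s != "" && PySem.Str.isIn left s && !(PySem.Str.endswith s right)

-- B's modification pass, abstracted
def pvSetAll (right : String) (M : List String) (S : List Nat) : List String :=
  S.foldl (fun ls i => ls.set i (PySem.Str.rstrip (ls.getD i "") ++ right)) M

-- indices j < i whose line is eligible, increasing
def pvEligUpTo (left right : String) (M : List String) (i : Nat) : List Nat :=
  (List.range i).filter (fun j => pvElig left right (M.getD j ""))

-- last k elements (B's slice)
def pvLastK (k : Int) (xs : List Nat) : List Nat :=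
  if k > 0 then xs.drop (xs.length - k.toNat) else []

theorem pvGetD_set_ne (l : List String) (i j : Nat) (v d : String) (h : j ≠ i) :
    (l.set i v).getD j d = l.getD j d := by
  rw [List.getD, List.getD, List.getElem?_set_ne (by omega)]

theorem pvEligUpTo_set (left right : String) (M : List String) (i : Nat) (v : String) :
    pvEligUpTo left right (M.set i v) i = pvEligUpTo left right M i := by
  unfold pvEligUpTo
  apply List.filter_congr
  intro j hj
  rw [pvGetD_set_ne _ _ _ _ _ (by simp at hj; omega)]

theorem pvLastK_append (k : Int) (E : List Nat) (i : Nat) (hk : 1 ≤ k) :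
    pvLastK k (E ++ [i]) = pvLastK (k - 1) E ++ [i] := by
  unfold pvLastK
  rw [if_pos (by omega)]
  by_cases h1 : k = 1
  · subst h1
    rw [if_neg (by omega), List.length_append, List.length_singleton]
    have : E.length + 1 - (1 : Int).toNat = E.length := by omega
    rw [this, List.drop_append_of_le_length (by omega), List.drop_length, List.nil_append]
  · rw [if_pos (by omega)]
    have hkn : k.toNat = (k - 1).toNat + 1 := by omega
    rw [List.length_append, List.length_singleton, hkn,
      List.drop_append_of_le_length (by omega)]
    have : E.length + 1 - ((k - 1).toNat + 1) = E.length - (k - 1).toNat := by omega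
    rw [this]

theorem pvSetAll_getD_ne (right : String) (M : List String) (S : List Nat) (i : Nat) (d : String)
    (h : ∀ j ∈ S, j ≠ i) : (pvSetAll right M S).getD i d = M.getD i d := by
  induction S generalizing M with
  | nil => rfl
  | cons j t ih =>
    unfold pvSetAll at ih ⊢
    rw [List.foldl_cons, ih _ (fun x hx => h x (List.mem_cons_of_mem _ hx)),
      pvGetD_set_ne _ _ _ _ _ (Ne.symm (h j (List.mem_cons_self ..)))]

theorem pvSetAll_set_comm (right : String) (M : List String) (S : List Nat) (i : Nat) (v : String)
    (h : ∀ j ∈ S, j ≠ i) : pvSetAll right (M.set i v) S = (pvSetAll right M S).set i v := by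
  induction S generalizing M with
  | nil => rfl
  | cons j t ih =>
    have hji : j ≠ i := h j (List.mem_cons_self ..)
    unfold pvSetAll at ih ⊢
    rw [List.foldl_cons, List.foldl_cons,
      pvGetD_set_ne _ _ _ _ _ hji, List.set_comm _ _ hji.symm,
      ih _ (fun x hx => h x (List.mem_cons_of_mem _ hx))]

theorem pvSetAll_append_one (right : String) (M : List String) (S : List Nat) (i : Nat) :
    pvSetAll right M (S ++ [i]) =
      (pvSetAll right M S).set i (PySem.Str.rstrip ((pvSetAll right M S).getD i "") ++ right) := by
  unfold pvSetAll
  rw [List.foldl_append]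
  rfl

theorem pvEligUpTo_mem_lt (left right : String) (M : List String) (i : Nat) (j : Nat)
    (h : j ∈ pvEligUpTo left right M i) : j < i := by
  unfold pvEligUpTo at h
  exact List.mem_range.mp (List.mem_of_mem_filter h)

theorem pvLastK_sublist (k : Int) (xs : List Nat) : List.Sublist (pvLastK k xs) xs := by
  unfold pvLastK
  split
  · exact List.drop_sublist _ _
  · exact List.nil_sublist _

-- A's loop computes: modify the last (count - added) eligible indices below the fuel
theorem addClosingA_loop_eq (left right : String) (count : Int) :
    ∀ (i : Nat) (M : List String) (a : Int),
      addClosingA_loop left right count i M a =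
        pvSetAll right M (pvLastK (count - a) (pvEligUpTo left right M i)) := by
  intro i
  induction i with
  | zero =>
    intro M a
    simp [addClosingA_loop, pvEligUpTo, pvLastK, pvSetAll]
  | succ i ih =>
    intro M a
    have hrange : pvEligUpTo left right M (i + 1) =
        pvEligUpTo left right M i ++
          (if pvElig left right (M.getD i "") then [i] else []) := by
      unfold pvEligUpTo
      rw [List.range_succ, List.filter_append, List.filter_singleton]
      cases pvElig left right (M.getD i "") <;> rfl
    rw [addClosingA_loop]
    by_cases hbrk : count ≤ a
    · rw [if_pos hbrk]
      have : pvLastK (count - a) (pvEligUpTo left right M (i + 1)) = [] := by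
        unfold pvLastK; rw [if_neg (by omega)]
      rw [this]; rfl
    · rw [if_neg hbrk]
      by_cases hp : pvElig left right (M.getD i "")
      · have hp' : (let line := PySem.Str.strip (M.getD i "");
            line != "" && PySem.Str.isIn left line && !(PySem.Str.endswith line right)) = true := hp
        simp only [hp', if_true, hrange, hp, ih]
        rw [pvEligUpTo_set, pvLastK_append _ _ _ (by omega),
          show count - (a + 1) = count - a - 1 from by ring]
        have hlt : ∀ j ∈ pvLastK (count - a - 1) (pvEligUpTo left right M i), j ≠ i := by
          intro j hj
          have := pvEligUpTo_mem_lt left right M i j ((pvLastK_sublist _ _).subset hj)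
          omega
        rw [pvSetAll_append_one, pvSetAll_getD_ne _ _ _ _ _ hlt,
          pvSetAll_set_comm _ _ _ _ _ hlt]
      · have hp' : (let line := PySem.Str.strip (M.getD i "");
            line != "" && PySem.Str.isIn left line && !(PySem.Str.endswith line right)) = false := by
          simpa [pvElig] using hp
        simp only [hp', if_false, Bool.false_eq_true, hrange, hp, ih, List.append_nil]

-- B's forward index collection equals the range-filter characterisation
theorem pvEnum_filter_map (left right : String) :
    ∀ (L : List String) (s : Int), 0 ≤ s →
      ((PySem.List.enumerate L s).filter (fun p =>
          let t := PySem.Str.strip p.2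
          t != "" && PySem.Str.isIn left t && !(PySem.Str.endswith t right))).map
        (fun p => p.1.toNat) =
      ((List.range L.length).filter (fun j => pvElig left right (L.getD j ""))).map
        (fun j => j + s.toNat) := by
  intro L
  induction L with
  | nil => intro s _; rfl
  | cons ln t ih =>
    intro s hs
    rw [PySem.List.enumerate, List.length_cons, List.range_succ_eq_map,
      List.filter_cons, List.filter_cons]
    have htail : ∀ b : Bool,
        (List.filter (fun j => pvElig left right ((ln :: t).getD j ""))
            (List.map Nat.succ (List.range t.length))).map (fun j => j + s.toNat) =
          ((List.range t.length).filter (fun j => pvElig left right (t.getD j ""))).map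
            (fun j => j + (s + 1).toNat) := by
      intro _
      have hpred : ((fun j => pvElig left right ((ln :: t).getD j "")) ∘ Nat.succ)
          = (fun j => pvElig left right (t.getD j "")) := by
        funext j
        simp only [Function.comp_apply, Nat.succ_eq_add_one, List.getD_cons_succ]
      rw [List.filter_map, List.map_map, hpred]
      apply List.map_congr_left
      intro j _
      simp only [Function.comp_apply, Nat.succ_eq_add_one]
      omega
    by_cases hp : pvElig left right ln
    · have hp1 : (let s := PySem.Str.strip ln;
          s != "" && PySem.Str.isIn left s && !(PySem.Str.endswith s right)) = true := hp
      have hp2 : pvElig left right ((ln :: t).getD 0 "") = true := hp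
      rw [if_pos hp1, if_pos hp2, List.map_cons, List.map_cons, htail true,
        ih (s + 1) (by omega)]
      congr 1
      omega
    · have hp1 : (let s := PySem.Str.strip ln;
          s != "" && PySem.Str.isIn left s && !(PySem.Str.endswith s right)) = false := by
        simpa [pvElig] using hp
      have hp2 : ¬ pvElig left right ((ln :: t).getD 0 "") = true := hp
      rw [if_neg (by simp only [hp1]; exact Bool.false_ne_true), if_neg hp2, htail false, ih (s + 1) (by omega)]

-- ===== VERDICT (by name: the statement is the Claim_ definition above) =====
theorem add_closing_brackets_py_spec : Claim_equal_add_closing_brackets_py := by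
  intro content left right count _
  unfold Spec_add_closing_brackets_py
  simp only [add_closing_brackets_py, add_closing_brackets_py_alt]
  set L := (PySem.Str.split? content "\n").getD [] with hL
  have hA := addClosingA_loop_eq left right count L.length L 0
  have hB := pvEnum_filter_map left right L 0 (by omega)
  simp only [Int.toNat_zero, Nat.add_zero, List.map_id'] at hB
  rw [hA, hB, sub_zero]
  rfl
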